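-- pv_equiv track=rewrite | github.com/guyuchao/iNAS | iNAS/search/evolution_search.py | ParetoTwoDimensions
-- ===== SOURCE A (Python) =====
-- from operator import itemgetter
--
-- def ParetoTwoDimensions(data):
--     sorted_data = sorted(data, key=itemgetter(0, 1), reverse=False)
--     assert data == sorted_data
--     pareto_idx = list()
--     pareto_idx.append(0)
--     cut_off = sorted_data[0][1]
--     for i in range(1, len(sorted_data)):
--         if sorted_data[i][1] > cut_off:
--             pareto_idx.append(i)
--             cut_off = sorted_data[i][1]
--     return pareto_idx
-- ===== SOURCE B (Python) =====
-- from operator import itemgetter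
--
-- def ParetoTwoDimensions(data):
--     sorted_data = sorted(data, key=itemgetter(0, 1), reverse=False)
--     assert data == sorted_data
--     def rec(lo, hi):
--         # Pareto-record indices of sorted_data[lo:hi], as absolute indices
--         if hi - lo <= 1:
--             return list(range(lo, hi))
--         mid = (lo + hi) // 2
--         left = rec(lo, mid)
--         right = rec(mid, hi)
--         cut = sorted_data[left[-1]][1]
--         return left + [i for i in right if sorted_data[i][1] > cut]
--     return rec(0, len(sorted_data))
-- ===== Notes on version B (the rewrite author's own statement) =====
-- stated objective: alternative
-- what changed: Replaced A's single left-to-right scan with a running cut_off by a divide-and-conquer: recursively compute the Pareto-record indices of each half of the sorted data, then merge by keeping the left half's records and filtering the right half's records against the y-value of the left half's last record.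
import Mathlib
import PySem

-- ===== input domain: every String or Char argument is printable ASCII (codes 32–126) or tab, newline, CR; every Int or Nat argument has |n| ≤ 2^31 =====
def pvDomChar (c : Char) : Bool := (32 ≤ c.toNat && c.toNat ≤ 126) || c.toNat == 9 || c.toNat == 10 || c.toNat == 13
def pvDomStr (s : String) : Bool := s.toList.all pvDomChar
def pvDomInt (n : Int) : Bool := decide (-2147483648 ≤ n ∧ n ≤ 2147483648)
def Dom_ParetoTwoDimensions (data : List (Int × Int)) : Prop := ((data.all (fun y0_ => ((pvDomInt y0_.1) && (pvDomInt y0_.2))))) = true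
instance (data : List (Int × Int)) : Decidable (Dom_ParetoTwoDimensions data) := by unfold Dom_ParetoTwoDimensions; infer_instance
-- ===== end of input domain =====

-- B replaces A's single left-to-right cut_off scan by a divide-and-conquer merge of the two
-- halves' Pareto records; same cost, proved equal on nonempty sorted input, B returns [] where A raises.

-- ===== PORT A =====
-- the 'for i in range(1, len(sorted_data))' loop: walks the tail, carrying index i, cut_off and pareto_idx
def aLoop : List (Int × Int) → Int → Int → List Int → List Int
  | [], _, _, acc => acc
  | r :: rest, i, cut_off, acc =>
    if r.2 > cut_off then aLoop rest (i + 1) r.2 (acc ++ [i])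
    else aLoop rest (i + 1) cut_off acc

def ParetoTwoDimensions (data : List (Int × Int)) : List Int :=
  let sorted_data := PySem.List.sorted2 data (fun r => r.1) (fun r => r.2) false
  if data = sorted_data then
    match sorted_data with
    | [] => []            -- sorted_data[0][1] raises IndexError here; excluded by Pre_
    | x :: rest => aLoop rest 1 x.2 [0]
  else []                 -- the assert fails here (AssertionError); excluded by Pre_

-- ===== PORT B =====
-- B's recursive helper rec(lo, hi): Pareto-record indices of sorted_data[lo:hi], absolute
-- indices; fuel (≥ hi - lo at every call) only makes the halving recursion structural
def bRec (sd : List (Int × Int)) : Nat → Nat → Nat → List Int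
  | 0, _, _ => []
  | f + 1, lo, hi =>
    if hi - lo ≤ 1 then (List.range' lo (hi - lo)).map Int.ofNat
    else
      let mid := (lo + hi) / 2
      let left := bRec sd f lo mid
      let right := bRec sd f mid hi
      let cut := (sd.getD (left.getLastD 0).toNat (0, 0)).2
      left ++ right.filter (fun i => decide ((sd.getD i.toNat (0, 0)).2 > cut))

def ParetoTwoDimensions_alt (data : List (Int × Int)) : List Int :=
  let sorted_data := PySem.List.sorted2 data (fun r => r.1) (fun r => r.2) false
  if data = sorted_data then bRec sorted_data sorted_data.length 0 sorted_data.length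
  else []                 -- the assert fails here (AssertionError); excluded by Pre_

-- ===== PRECONDITION & SPEC =====
-- Pre_ excludes exactly the inputs on which Python A raises: the empty list (IndexError at
-- sorted_data[0]) and lists not already sorted by (first, second) (AssertionError).
def Pre_ParetoTwoDimensions (data : List (Int × Int)) : Prop :=
  data ≠ [] ∧ data.IsChain (fun a b => a.1 < b.1 ∨ (a.1 = b.1 ∧ a.2 ≤ b.2))
instance (data : List (Int × Int)) : Decidable (Pre_ParetoTwoDimensions data) := by
  unfold Pre_ParetoTwoDimensions; infer_instance

def pvWitness_ParetoTwoDimensions : (List (Int × Int)) := [(0, 2), (1, 1), (1, 3)]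

def Spec_ParetoTwoDimensions (data : List (Int × Int)) (out : List Int) : Prop := out = ParetoTwoDimensions_alt data
instance (data : List (Int × Int)) (out : List Int) : Decidable (Spec_ParetoTwoDimensions data out) := by unfold Spec_ParetoTwoDimensions; infer_instance

-- ===== CLAIM (what is proved, stated in full; the proofs are below) =====
def Claim_equal_ParetoTwoDimensions : Prop := ∀ (data : List (Int × Int)), Dom_ParetoTwoDimensions data → Pre_ParetoTwoDimensions data → Spec_ParetoTwoDimensions data (ParetoTwoDimensions data)

-- ===== LEMMAS AND PROOFS =====

-- reference form: sequential record selection over sd's index range [lo, hi) with optional prior max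
def yAt (sd : List (Int × Int)) (k : Nat) : Int := (sd.getD k (0, 0)).2

def sel (sd : List (Int × Int)) (lo hi : Nat) (m : Option Int) : List Int :=
  if lo < hi then
    match m with
    | none => Int.ofNat lo :: sel sd (lo + 1) hi (some (yAt sd lo))
    | some v =>
      if yAt sd lo > v then Int.ofNat lo :: sel sd (lo + 1) hi (some (yAt sd lo))
      else sel sd (lo + 1) hi (some v)
  else []
  termination_by hi - lo

-- running maximum over [lo, hi)
def mx (sd : List (Int × Int)) (lo hi : Nat) (m : Option Int) : Option Int :=
  if lo < hi then
    mx sd (lo + 1) hi (some (match m with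
      | none => yAt sd lo
      | some v => if yAt sd lo > v then yAt sd lo else v))
  else m
  termination_by hi - lo

theorem sel_stop (sd : List (Int × Int)) (lo hi : Nat) (m : Option Int) (h : ¬ lo < hi) :
    sel sd lo hi m = [] := by rw [sel.eq_def, if_neg h]

theorem mx_stop (sd : List (Int × Int)) (lo hi : Nat) (m : Option Int) (h : ¬ lo < hi) :
    mx sd lo hi m = m := by rw [mx.eq_def, if_neg h]

theorem sel_some_step (sd : List (Int × Int)) (lo hi : Nat) (v : Int) (h : lo < hi) :
    sel sd lo hi (some v) =
      if yAt sd lo > v then Int.ofNat lo :: sel sd (lo + 1) hi (some (yAt sd lo))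
      else sel sd (lo + 1) hi (some v) := by
  rw [sel.eq_def, if_pos h]

theorem sel_none_step (sd : List (Int × Int)) (lo hi : Nat) (h : lo < hi) :
    sel sd lo hi none = Int.ofNat lo :: sel sd (lo + 1) hi (some (yAt sd lo)) := by
  rw [sel.eq_def, if_pos h]

theorem mx_some_step (sd : List (Int × Int)) (lo hi : Nat) (v : Int) (h : lo < hi) :
    mx sd lo hi (some v) = mx sd (lo + 1) hi (some (if yAt sd lo > v then yAt sd lo else v)) := by
  rw [mx.eq_def, if_pos h]

theorem mx_none_step (sd : List (Int × Int)) (lo hi : Nat) (h : lo < hi) :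
    mx sd lo hi none = mx sd (lo + 1) hi (some (yAt sd lo)) := by
  rw [mx.eq_def, if_pos h]

-- every selected index with prior max v has y-value strictly above v
theorem sel_mem_gt (sd : List (Int × Int)) :
    ∀ (n lo hi : Nat), hi - lo = n → ∀ (v : Int) (j : Int),
      j ∈ sel sd lo hi (some v) → (sd.getD j.toNat (0, 0)).2 > v := by
  intro n
  induction n with
  | zero => intro lo hi hn v j hj; rw [sel_stop sd lo hi _ (by omega)] at hj; simp at hj
  | succ k ih =>
    intro lo hi hn v j hj
    by_cases hlt : lo < hi
    · rw [sel_some_step sd lo hi v hlt] at hj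
      by_cases hy : yAt sd lo > v
      · rw [if_pos hy, List.mem_cons] at hj
        rcases hj with rfl | hj
        · exact hy
        · exact lt_trans hy (ih (lo + 1) hi (by omega) (yAt sd lo) j hj)
      · rw [if_neg hy] at hj
        exact ih (lo + 1) hi (by omega) v j hj
    · rw [sel_stop sd lo hi _ hlt] at hj; simp at hj

-- F (generalized): selection with a larger prior max = filter of selection with a smaller one
theorem sel_filter (sd : List (Int × Int)) :
    ∀ (n lo hi : Nat), hi - lo = n → ∀ (c v : Int), v ≤ c →
      sel sd lo hi (some c) =
        (sel sd lo hi (some v)).filter (fun j => decide ((sd.getD j.toNat (0, 0)).2 > c)) := by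
  intro n
  induction n with
  | zero =>
    intro lo hi hn c v _
    rw [sel_stop sd lo hi _ (by omega), sel_stop sd lo hi _ (by omega)]; rfl
  | succ k ih =>
    intro lo hi hn c v hvc
    by_cases hlt : lo < hi
    · rw [sel_some_step sd lo hi c hlt, sel_some_step sd lo hi v hlt]
      by_cases hyv : yAt sd lo > v
      · rw [if_pos hyv, List.filter_cons]
        by_cases hyc : yAt sd lo > c
        · rw [if_pos hyc,
            if_pos (show (decide ((sd.getD (Int.ofNat lo).toNat (0, 0)).2 > c)) = true from
              decide_eq_true hyc)]
          congr 1
          symm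
          apply List.filter_eq_self.mpr
          intro j hj
          have := sel_mem_gt sd (hi - (lo + 1)) (lo + 1) hi rfl (yAt sd lo) j hj
          exact decide_eq_true (by omega)
        · rw [if_neg hyc, (show (decide ((sd.getD (Int.ofNat lo).toNat (0, 0)).2 > c)) = false from
            decide_eq_false hyc)]
          rw [if_neg (by simp)]
          exact ih (lo + 1) hi (by omega) c (yAt sd lo) (by omega)
      · rw [if_neg hyv, if_neg (show ¬ yAt sd lo > c by omega)]
        exact ih (lo + 1) hi (by omega) c v hvc
    · rw [sel_stop sd lo hi _ hlt, sel_stop sd lo hi _ hlt]; rfl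

-- F at the none start: selection with prior max c = filter of the plain selection
theorem sel_filter_none (sd : List (Int × Int)) (lo hi : Nat) (c : Int) :
    sel sd lo hi (some c) =
      (sel sd lo hi none).filter (fun j => decide ((sd.getD j.toNat (0, 0)).2 > c)) := by
  by_cases hlt : lo < hi
  · rw [sel_none_step sd lo hi hlt, sel_some_step sd lo hi c hlt, List.filter_cons]
    by_cases hy : yAt sd lo > c
    · rw [if_pos hy,
        if_pos (show (decide ((sd.getD (Int.ofNat lo).toNat (0, 0)).2 > c)) = true from
          decide_eq_true hy)]
      congr 1
      symm
      apply List.filter_eq_self.mpr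
      intro j hj
      have := sel_mem_gt sd (hi - (lo + 1)) (lo + 1) hi rfl (yAt sd lo) j hj
      exact decide_eq_true (by omega)
    · rw [if_neg hy, (show (decide ((sd.getD (Int.ofNat lo).toNat (0, 0)).2 > c)) = false from
        decide_eq_false hy)]
      rw [if_neg (by simp)]
      exact sel_filter sd (hi - (lo + 1)) (lo + 1) hi rfl c (yAt sd lo) (by omega)
  · rw [sel_stop sd lo hi _ hlt, sel_stop sd lo hi _ hlt]; rfl

-- S: splitting a sequential selection at mid, with the running max carried across
theorem sel_split (sd : List (Int × Int)) :
    ∀ (n lo mid hi : Nat), mid - lo = n → lo ≤ mid → mid ≤ hi → ∀ (m : Option Int),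
      sel sd lo hi m = sel sd lo mid m ++ sel sd mid hi (mx sd lo mid m) := by
  intro n
  induction n with
  | zero =>
    intro lo mid hi hn h1 h2 m
    have : lo = mid := by omega
    subst this
    rw [sel_stop sd lo lo m (by omega), mx_stop sd lo lo m (by omega)]; rfl
  | succ k ih =>
    intro lo mid hi hn h1 h2 m
    have hlt : lo < mid := by omega
    have hlh : lo < hi := by omega
    cases m with
    | none =>
      rw [sel_none_step sd lo hi hlh, sel_none_step sd lo mid hlt, mx_none_step sd lo mid hlt,
        List.cons_append, ih (lo + 1) mid hi (by omega) (by omega) h2 (some (yAt sd lo))]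
    | some v =>
      rw [sel_some_step sd lo hi v hlh, sel_some_step sd lo mid v hlt, mx_some_step sd lo mid v hlt]
      by_cases hy : yAt sd lo > v
      · rw [if_pos hy, if_pos hy, if_pos hy, List.cons_append,
          ih (lo + 1) mid hi (by omega) (by omega) h2 (some (yAt sd lo))]
      · rw [if_neg hy, if_neg hy, if_neg hy,
          ih (lo + 1) mid hi (by omega) (by omega) h2 (some v)]

-- L (generalized): the last selected index (default jd with y(jd) = prior max) achieves the running max
theorem sel_last_mx (sd : List (Int × Int)) :
    ∀ (n lo hi : Nat), hi - lo = n → ∀ (c : Int) (jd : Int), 0 ≤ jd →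
      (sd.getD jd.toNat (0, 0)).2 = c →
      mx sd lo hi (some c) =
        some ((sd.getD ((sel sd lo hi (some c)).getLastD jd).toNat (0, 0)).2) := by
  intro n
  induction n with
  | zero =>
    intro lo hi hn c jd _ hj
    rw [sel_stop sd lo hi _ (by omega), mx_stop sd lo hi _ (by omega)]
    exact congrArg some hj.symm
  | succ k ih =>
    intro lo hi hn c jd hjd hj
    by_cases hlt : lo < hi
    · rw [mx_some_step sd lo hi c hlt, sel_some_step sd lo hi c hlt]
      by_cases hy : yAt sd lo > c
      · rw [if_pos hy, if_pos hy, List.getLastD_cons]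
        exact ih (lo + 1) hi (by omega) (yAt sd lo) (Int.ofNat lo) (Int.natCast_nonneg lo) rfl
      · rw [if_neg hy, if_neg hy]
        exact ih (lo + 1) hi (by omega) c jd hjd hj
    · rw [sel_stop sd lo hi _ hlt, mx_stop sd lo hi _ hlt]
      exact congrArg some hj.symm

-- L for the none start: the last index of a nonempty selection achieves the running max
theorem sel_last_none (sd : List (Int × Int)) (lo hi : Nat) (h : lo < hi) :
    mx sd lo hi none =
      some ((sd.getD ((sel sd lo hi none).getLastD 0).toNat (0, 0)).2) := by
  rw [sel_none_step sd lo hi h, mx_none_step sd lo hi h, List.getLastD_cons]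
  exact sel_last_mx sd (hi - (lo + 1)) (lo + 1) hi rfl (yAt sd lo) (Int.ofNat lo)
    (Int.natCast_nonneg lo) rfl

-- bRec computes the sequential selection (for any sufficient fuel)
theorem bRec_eq_sel (sd : List (Int × Int)) :
    ∀ (fuel lo hi : Nat), hi - lo ≤ fuel → bRec sd fuel lo hi = sel sd lo hi none := by
  intro fuel
  induction fuel with
  | zero => intro lo hi hf; rw [sel_stop sd lo hi _ (by omega)]; rfl
  | succ f ih =>
    intro lo hi hf
    by_cases hb : hi - lo ≤ 1
    · show (if hi - lo ≤ 1 then (List.range' lo (hi - lo)).map Int.ofNat else _) = _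
      rw [if_pos hb]
      by_cases h0 : hi - lo = 0
      · rw [sel_stop sd lo hi _ (by omega)]; simp [h0]
      · have h1 : hi - lo = 1 := by omega
        rw [sel_none_step sd lo hi (by omega), sel_stop sd (lo + 1) hi _ (by omega)]
        simp [h1, List.range'_succ]
    · show (if hi - lo ≤ 1 then _ else _) = _
      rw [if_neg hb]
      simp only []
      set mid := (lo + hi) / 2 with hmid
      have hlm : lo < mid := by omega
      have hmh : mid < hi := by omega
      rw [ih lo mid (by omega), ih mid hi (by omega)]
      have hlast := sel_last_none sd lo mid hlm
      obtain ⟨v, hv⟩ : ∃ v, mx sd lo mid none = some v := ⟨_, hlast⟩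
      have hcut : (sd.getD ((sel sd lo mid none).getLastD 0).toNat (0, 0)).2 = v := by
        rw [hlast] at hv; exact Option.some.inj hv
      rw [hcut, ← sel_filter_none sd mid hi v,
        sel_split sd (mid - lo) lo mid hi rfl (by omega) (by omega) none, hv]

-- the A loop is the sequential selection over the remaining index range
theorem aLoop_eq_sel (sd : List (Int × Int)) :
    ∀ (t : List (Int × Int)) (k : Nat) (m : Int) (acc : List Int),
      sd.drop k = t →
      aLoop t (Int.ofNat k) m acc = acc ++ sel sd k sd.length (some m) := by
  intro t
  induction t with
  | nil =>
    intro k m acc hd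
    have : sd.length ≤ k := by
      by_contra h
      have := List.drop_eq_nil_iff.mp hd
      omega
    rw [sel_stop sd k sd.length _ (by omega)]
    simp [aLoop]
  | cons r t' ihh =>
    intro k m acc hd
    have hk : k < sd.length := by
      by_contra h
      rw [List.drop_eq_nil_of_le (by omega)] at hd
      simp at hd
    have hget : sd.getD k (0, 0) = r := by
      have : sd[k]? = some r := by rw [← List.head?_drop, hd]; rfl
      simp [List.getD_eq_getElem?_getD, this]
    have hy : yAt sd k = r.2 := by rw [yAt, hget]
    have hd' : sd.drop (k + 1) = t' := by
      have : sd.drop (k + 1) = (sd.drop k).drop 1 := by rw [List.drop_drop]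
      rw [this, hd]; rfl
    have hcast : (Int.ofNat k) + 1 = Int.ofNat (k + 1) := rfl
    rw [sel_some_step sd k sd.length m hk, hy]
    by_cases h : r.2 > m
    · simp only [aLoop, if_pos h, hcast]
      rw [ihh (k + 1) r.2 (acc ++ [Int.ofNat k]) hd']
      simp
    · simp only [aLoop, if_neg h, hcast]
      exact ihh (k + 1) m acc hd'

-- ===== VERDICT (by name: the statement is the Claim_ definition above) =====
theorem ParetoTwoDimensions_spec : Claim_equal_ParetoTwoDimensions := by
  intro data _ _
  unfold Spec_ParetoTwoDimensions ParetoTwoDimensions ParetoTwoDimensions_alt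
  simp only []
  by_cases hg : data = PySem.List.sorted2 data (fun r => r.1) (fun r => r.2) false
  · rw [if_pos hg, if_pos hg]
    cases hsd : PySem.List.sorted2 data (fun r => r.1) (fun r => r.2) false with
    | nil => rfl
    | cons x rest =>
      show aLoop rest 1 x.2 [0] = bRec (x :: rest) (x :: rest).length 0 (x :: rest).length
      rw [bRec_eq_sel (x :: rest) (x :: rest).length 0 (x :: rest).length (by omega)]
      have h0 : (0 : Nat) < (x :: rest).length := by simp
      rw [sel_none_step (x :: rest) 0 (x :: rest).length h0]
      have hy0 : yAt (x :: rest) 0 = x.2 := rfl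
      rw [hy0]
      have := aLoop_eq_sel (x :: rest) rest 1 x.2 [0] (by rfl)
      rw [show (Int.ofNat 1) = (1 : Int) from rfl] at this
      rw [this]
      rfl
  · rw [if_neg hg, if_neg hg]
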